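-- pv_equiv track=rewrite | github.com/Sanjar18/se-linalg-2023 | transform_express.py | open_brackets
-- ===== SOURCE A (Python) =====
-- def open_brackets(expression):
--     exsp = ''
--     exsp2 = ''
--     other = ''
--     flag = True
--     k = 0
--     for i in expression:
--         if i in '()':
--             flag = not flag
--             if flag:
--                 k = 1
--         elif not flag:
--             other += i
--         elif flag:
--             if k == 0:
--                 exsp += i
--             else:
--                 exsp2 += i
--     return [exsp + x +exsp2 for x in other.split('+')]
-- ===== SOURCE B (Python) =====
-- def open_brackets(expression):
--     # Split the expression at every parenthesis (both kinds), then deal the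
--     # segments into alternating outside/inside groups instead of scanning chars.
--     def alt(l):
--         # deal a list into (elements at even positions, elements at odd positions)
--         if not l:
--             return [], []
--         here, there = alt(l[1:])
--         return [l[0]] + there, here
--
--     segs = expression.replace(')', '(').split('(')
--     evens, odds = alt(segs)
--     inside = ''.join(odds)
--     suffix = ''.join(evens[1:])
--     return [evens[0] + x + suffix for x in inside.split('+')]
-- ===== Notes on version B (the rewrite author's own statement) =====
-- stated objective: simpler
-- what changed: replaces the character-by-character state machine (flag toggle and latched k) with one split of the string at every parenthesis, dealing the segments into alternating outside/inside groups: prefix = first segment, inside = odd segments joined, suffix = remaining even segments joined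
import Mathlib
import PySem

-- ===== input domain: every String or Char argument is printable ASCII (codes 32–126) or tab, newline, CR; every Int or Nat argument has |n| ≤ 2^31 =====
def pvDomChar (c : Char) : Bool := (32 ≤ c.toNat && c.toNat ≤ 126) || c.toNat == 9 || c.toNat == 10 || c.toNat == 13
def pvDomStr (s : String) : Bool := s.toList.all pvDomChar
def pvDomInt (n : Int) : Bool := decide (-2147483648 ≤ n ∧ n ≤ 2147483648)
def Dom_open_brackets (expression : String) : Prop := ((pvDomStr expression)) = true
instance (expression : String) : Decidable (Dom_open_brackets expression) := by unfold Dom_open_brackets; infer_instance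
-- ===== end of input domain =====

-- B replaces A's character-by-character state machine (flag toggle, latched k) by one split
-- of the string at every parenthesis followed by dealing the segments into alternating
-- outside/inside groups; objective: simpler.

-- ===== PORT A =====
-- loop body of A's 'for i in expression', state (exsp, exsp2, other, flag, k)
def openBracketsStep (s : List Char × List Char × List Char × Bool × Nat) (i : Char) :
    List Char × List Char × List Char × Bool × Nat :=
  let (exsp, exsp2, other, flag, k) := s
  if i = '(' ∨ i = ')' then                         -- i in '()'
    let flag' := !flag
    if flag' then (exsp, exsp2, other, flag', 1) else (exsp, exsp2, other, flag', k)
  else if flag = false then (exsp, exsp2, other ++ [i], flag, k)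
  else if k = 0 then (exsp ++ [i], exsp2, other, flag, k)
  else (exsp, exsp2 ++ [i], other, flag, k)

def open_brackets (expression : String) : List String :=
  let st := expression.toList.foldl openBracketsStep ([], [], [], true, 0)
  (PySem.Chars.splitOn st.2.2.1 ['+']).map (fun x => String.ofList (st.1 ++ x ++ st.2.1))

-- ===== PORT B =====
-- Source B's helper alt(l): deal a list into (elements at even positions, elements at odd positions)
def altDeal (l : List (List Char)) : List (List Char) × List (List Char) :=
  match l with
  | [] => ([], [])
  | x :: xs => let (here, there) := altDeal xs; (x :: there, here)

def open_brackets_alt (expression : String) : List String :=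
  let segs := PySem.Chars.splitOn (PySem.Chars.replace expression.toList [')'] ['(']) ['(']
  let ed := altDeal segs
  let inside := PySem.Chars.join [] ed.2
  let suffix := PySem.Chars.join [] (PySem.List.slice ed.1 (some 1) none)
  -- evens[0]: split() always returns at least one segment, so evens ≠ [] and [0] is the head
  (PySem.Chars.splitOn inside ['+']).map (fun x => String.ofList (ed.1.headD [] ++ x ++ suffix))

-- ===== PRECONDITION & SPEC =====
def Spec_open_brackets (expression : String) (out : List String) : Prop := out = open_brackets_alt expression
instance (expression : String) (out : List String) : Decidable (Spec_open_brackets expression out) := by unfold Spec_open_brackets; infer_instance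

-- ===== CLAIM (what is proved, stated in full; the proofs are below) =====
def Claim_equal_open_brackets : Prop := ∀ (expression : String), Dom_open_brackets expression → Spec_open_brackets expression (open_brackets expression)

-- ===== LEMMAS AND PROOFS =====

-- replace ')' by '(' is a character map
def pvRepl (c : Char) : Char := if c = ')' then '(' else c

theorem replace_go_map (fuel : Nat) : ∀ (l acc : List Char), l.length ≤ fuel →
    PySem.Chars.replace.go [')'] ['('] fuel l acc = acc.reverse ++ l.map pvRepl := by
  induction fuel with
  | zero =>
    intro l acc h
    have : l = [] := by cases l <;> simp_all
    subst this; simp [PySem.Chars.replace.go]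
  | succ f ih =>
    intro l acc h
    cases l with
    | nil => simp [PySem.Chars.replace.go]
    | cons c t =>
      simp only [List.length_cons] at h
      simp only [PySem.Chars.replace.go, List.isPrefixOf, Bool.and_true]
      by_cases hc : c = ')'
      · subst hc
        rw [if_pos (by simp)]
        simp only [show [')'].length = 1 from rfl, List.drop_one, List.tail_cons]
        rw [ih t _ (by omega)]
        simp [pvRepl]
      · rw [if_neg (by simp [Ne.symm hc])]
        rw [ih t _ (by omega)]
        simp [pvRepl, hc]

theorem replace_eq_map (s : List Char) :
    PySem.Chars.replace s [')'] ['('] = s.map pvRepl := by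
  simp [PySem.Chars.replace]
  simpa using replace_go_map s.length s []

-- split on '(' as a plain front recursion
def pvSplitP : List Char → List (List Char)
  | [] => [[]]
  | c :: cs =>
    if c = '(' then [] :: pvSplitP cs
    else
      match pvSplitP cs with
      | [] => [[c]]
      | h :: t => (c :: h) :: t

theorem pvSplitP_ne_nil (cs : List Char) : pvSplitP cs ≠ [] := by
  cases cs with
  | nil => simp [pvSplitP]
  | cons c cs =>
    simp only [pvSplitP]
    split
    · simp
    · split <;> simp_all

theorem splitOn_go_spec (fuel : Nat) : ∀ (l cur : List Char) (acc : List (List Char)), l.length < fuel →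
    PySem.Chars.splitOn.go ['('] fuel l cur acc =
      acc.reverse ++ ((cur.reverse ++ (pvSplitP l).headD []) :: (pvSplitP l).tail) := by
  induction fuel with
  | zero => intro l cur acc h; omega
  | succ f ih =>
    intro l cur acc h
    cases l with
    | nil => simp [PySem.Chars.splitOn.go, pvSplitP]
    | cons c t =>
      simp only [List.length_cons] at h
      simp only [PySem.Chars.splitOn.go, List.isPrefixOf, Bool.and_true]
      by_cases hc : c = '('
      · subst hc
        rw [if_pos (by simp)]
        simp only [show ['('].length = 1 from rfl, List.drop_one, List.tail_cons]
        rw [ih t [] _ (by omega)]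
        simp only [pvSplitP]
        rcases ht : pvSplitP t with _ | ⟨h0, t0⟩
        · exact absurd ht (pvSplitP_ne_nil t)
        · simp
      · rw [if_neg (by simp [Ne.symm hc])]
        rw [ih t _ _ (by omega)]
        simp only [pvSplitP, if_neg hc]
        rcases ht : pvSplitP t with _ | ⟨h0, t0⟩
        · exact absurd ht (pvSplitP_ne_nil t)
        · simp

theorem splitOn_eq (s : List Char) : PySem.Chars.splitOn s ['('] = pvSplitP s := by
  rw [PySem.Chars.splitOn, splitOn_go_spec (s.length + 1) s [] [] (by omega)]
  rcases hs : pvSplitP s with _ | ⟨h0, t0⟩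
  · exact absurd hs (pvSplitP_ne_nil s)
  · simp

-- join with the empty separator is flatten
theorem join_nil_flatten (l : List (List Char)) : PySem.Chars.join [] l = l.flatten := by
  induction l with
  | nil => simp [PySem.Chars.join_nil]
  | cons a t ih =>
    cases t with
    | nil => simp [PySem.Chars.join_singleton]
    | cons b r => rw [PySem.Chars.join_cons_cons]; simp only [List.flatten_cons] at ih ⊢; simp [ih]

-- the contribution (to exsp, other, exsp2) of the rest of A's loop, given the current flag and k
def pvF : List Char → Bool → Nat → List Char × List Char × List Char
  | [], _, _ => ([], [], [])
  | c :: cs, flag, k =>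
    if c = '(' ∨ c = ')' then
      pvF cs (!flag) (if !flag then 1 else k)
    else
      let r := pvF cs flag k
      if flag = false then (r.1, c :: r.2.1, r.2.2)
      else if k = 0 then (c :: r.1, r.2.1, r.2.2)
      else (r.1, r.2.1, c :: r.2.2)

theorem foldl_step_spec (cs : List Char) : ∀ (e x2 o : List Char) (flag : Bool) (k : Nat),
    ∃ f' k', List.foldl openBracketsStep (e, x2, o, flag, k) cs =
      (e ++ (pvF cs flag k).1, x2 ++ (pvF cs flag k).2.2, o ++ (pvF cs flag k).2.1, f', k') := by
  induction cs with
  | nil => intro e x2 o flag k; exact ⟨flag, k, by simp [pvF]⟩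
  | cons c cs ih =>
    intro e x2 o flag k
    simp only [List.foldl_cons, openBracketsStep, pvF]
    by_cases hc : c = '(' ∨ c = ')'
    · cases flag with
      | true =>
        obtain ⟨f', k', h⟩ := ih e x2 o false k
        exact ⟨f', k', by simp [hc, h]⟩
      | false =>
        obtain ⟨f', k', h⟩ := ih e x2 o true 1
        exact ⟨f', k', by simp [hc, h]⟩
    · cases flag with
      | false =>
        obtain ⟨f', k', h⟩ := ih e x2 (o ++ [c]) false k
        exact ⟨f', k', by simp [hc, h]⟩
      | true =>
        by_cases hk : k = 0
        · subst hk
          obtain ⟨f', k', h⟩ := ih (e ++ [c]) x2 o true 0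
          exact ⟨f', k', by simp [hc, h]⟩
        · obtain ⟨f', k', h⟩ := ih e (x2 ++ [c]) o true k
          exact ⟨f', k', by simp [hc, hk, h]⟩

theorem altDeal_cons (x : List Char) (xs : List (List Char)) :
    altDeal (x :: xs) = (x :: (altDeal xs).2, (altDeal xs).1) := rfl

-- characterisation of pvF in terms of the segments and the alternating deal
theorem pvF_char (cs : List Char) : ∀ (t0 : List Char) (ts : List (List Char)),
    pvSplitP (cs.map pvRepl) = t0 :: ts →
      pvF cs true 0 = (t0, ((altDeal ts).1).flatten, ((altDeal ts).2).flatten)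
    ∧ (∀ k, pvF cs false k = ([], t0 ++ ((altDeal ts).2).flatten, ((altDeal ts).1).flatten))
    ∧ pvF cs true 1 = ([], ((altDeal ts).1).flatten, t0 ++ ((altDeal ts).2).flatten) := by
  induction cs with
  | nil =>
    intro t0 ts h
    simp only [List.map_nil, pvSplitP] at h
    cases h
    simp [pvF, altDeal]
  | cons c cs ih =>
    intro t0 ts h
    by_cases hc : c = '(' ∨ c = ')'
    · have hr : pvRepl c = '(' := by rcases hc with rfl | rfl <;> simp [pvRepl]
      simp only [List.map_cons, hr, pvSplitP] at h
      injection h with h1 h2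
      subst h1
      rcases hT : pvSplitP (cs.map pvRepl) with _ | ⟨u0, us⟩
      · exact absurd hT (pvSplitP_ne_nil _)
      · subst h2
        obtain ⟨ih1, ih2, ih3⟩ := ih u0 us hT
        refine ⟨?_, ?_, ?_⟩ <;>
          simp [pvF, hc, hT, altDeal_cons, ih2, ih3]
    · have hr : pvRepl c = c := by
        have : c ≠ ')' := fun h' => hc (Or.inr h')
        simp [pvRepl, this]
      have hcp : c ≠ '(' := fun h' => hc (Or.inl h')
      simp only [List.map_cons, hr, pvSplitP, if_neg hcp] at h
      rcases hT : pvSplitP (cs.map pvRepl) with _ | ⟨u0, us⟩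
      · exact absurd hT (pvSplitP_ne_nil _)
      · rw [hT] at h
        injection h with h1 h2
        subst h2
        obtain ⟨ih1, ih2, ih3⟩ := ih u0 us hT
        refine ⟨?_, ?_, ?_⟩ <;>
          simp [pvF, hc, ih1, ih2, ih3, ← h1]

-- ===== VERDICT (by name: the statement is the Claim_ definition above) =====
theorem open_brackets_spec : Claim_equal_open_brackets := by
  intro expression _
  unfold Spec_open_brackets open_brackets open_brackets_alt
  rw [replace_eq_map, splitOn_eq]
  rcases hT : pvSplitP (expression.toList.map pvRepl) with _ | ⟨t0, ts⟩
  · exact absurd hT (pvSplitP_ne_nil _)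
  · obtain ⟨h1, _, _⟩ := pvF_char expression.toList t0 ts hT
    obtain ⟨f', k', hfold⟩ := foldl_step_spec expression.toList [] [] [] true 0
    simp only [hfold, h1, altDeal_cons]
    simp [PySem.List.slice_from_one, join_nil_flatten]
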